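-- pv_equiv track=rewrite | github.com/yannickloth/W33-Theory | scripts/tune_line_reps.py | build_symp_lines_from_line_rep
-- ===== SOURCE A (Python) =====
-- def build_symp_lines_from_line_rep(line_rep):
--     """Return 12x12 symplectic matrix on lines from a given line_rep list."""
--     n = len(line_rep)
--     M = [[0] * n for _ in range(n)]
--     for i in range(n):
--         p1 = line_rep[i]
--         for j in range(n):
--             p2 = line_rep[j]
--             M[i][j] = (p1[0] * p2[1] - p2[0] * p1[1]) % 3
--     return M
-- ===== SOURCE B (Python) =====
-- def build_symp_lines_from_line_rep(line_rep):
--     """Return 12x12 symplectic matrix on lines from a given line_rep list."""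
--     n = len(line_rep)
--
--     def cross(i, j):
--         (xi, yi), (xj, yj) = line_rep[i], line_rep[j]
--         return (xi * yj - xj * yi) % 3
--
--     # only the strict upper triangle is computed with the product formula
--     upper = [[cross(i, j) for j in range(i + 1, n)] for i in range(n)]
--     # each row is assembled: mirrored lower part, zero diagonal, upper part
--     return [[(-upper[j][i - j - 1]) % 3 for j in range(i)] + [0] + upper[i]
--             for i in range(n)]
-- ===== Notes on version B (the rewrite author's own statement) =====
-- stated objective: alternative
-- what changed: B is a purely functional two-stage construction: it computes only the strict upper triangle with the product formula (list of shortening rows), then assembles each output row as [mirrored lower part via (-upper[j][i-j-1]) % 3] + [0 diagonal] + [upper part], with no matrix mutation, instead of A's mutating full n^2 double loop.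
import Mathlib
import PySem

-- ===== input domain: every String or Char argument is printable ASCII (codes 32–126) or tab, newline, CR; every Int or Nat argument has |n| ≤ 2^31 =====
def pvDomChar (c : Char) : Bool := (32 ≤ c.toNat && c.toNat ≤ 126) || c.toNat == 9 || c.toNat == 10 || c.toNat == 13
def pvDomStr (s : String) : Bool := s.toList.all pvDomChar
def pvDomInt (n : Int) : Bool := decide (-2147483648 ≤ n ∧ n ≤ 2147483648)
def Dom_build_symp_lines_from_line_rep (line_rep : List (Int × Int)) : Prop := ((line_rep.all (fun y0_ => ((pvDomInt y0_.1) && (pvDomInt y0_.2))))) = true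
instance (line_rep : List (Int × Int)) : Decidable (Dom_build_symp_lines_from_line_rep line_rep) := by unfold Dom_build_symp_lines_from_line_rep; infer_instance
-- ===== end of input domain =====

-- B is a purely functional two-stage build: strict upper triangle computed once, each row assembled
-- as mirrored-lower ++ [0] ++ upper, with no mutation; same return value as A's full mutating double loop.

-- ===== PORT A =====
-- full n×n double loop, one product-mod per entry, via fold-with-set over a zero matrix
def build_symp_lines_from_line_rep (line_rep : List (Int × Int)) : List (List Int) :=
  let n := line_rep.length
  let M0 := List.replicate n (List.replicate n (0 : Int))
  (List.range n).foldl (fun M i =>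
    let p1 := line_rep.getD i (0, 0)
    (List.range n).foldl (fun M j =>
      let p2 := line_rep.getD j (0, 0)
      M.set i ((M.getD i []).set j (PySem.Int.mod (p1.1 * p2.2 - p2.1 * p1.2) 3))) M) M0

-- ===== PORT B =====
-- compute only the strict upper triangle, then assemble each row: mirror ++ [diagonal 0] ++ upper
def build_symp_lines_from_line_rep_alt (line_rep : List (Int × Int)) : List (List Int) :=
  let n := line_rep.length
  let cross := fun (i j : Nat) =>
    let p1 := line_rep.getD i (0, 0)
    let p2 := line_rep.getD j (0, 0)
    PySem.Int.mod (p1.1 * p2.2 - p2.1 * p1.2) 3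
  let upper := (List.range n).map (fun i => (List.range' (i + 1) (n - (i + 1))).map (cross i))
  (List.range n).map (fun i =>
    ((List.range i).map (fun j => PySem.Int.mod (-((upper.getD j []).getD (i - j - 1) 0)) 3))
      ++ [0] ++ upper.getD i [])

-- ===== PRECONDITION & SPEC =====
def Spec_build_symp_lines_from_line_rep (line_rep : List (Int × Int)) (out : List (List Int)) : Prop := out = build_symp_lines_from_line_rep_alt line_rep
instance (line_rep : List (Int × Int)) (out : List (List Int)) : Decidable (Spec_build_symp_lines_from_line_rep line_rep out) := by unfold Spec_build_symp_lines_from_line_rep; infer_instance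

-- ===== CLAIM (what is proved, stated in full; the proofs are below) =====
def Claim_equal_build_symp_lines_from_line_rep : Prop := ∀ (line_rep : List (Int × Int)), Dom_build_symp_lines_from_line_rep line_rep → Spec_build_symp_lines_from_line_rep line_rep (build_symp_lines_from_line_rep line_rep)

-- ===== LEMMAS AND PROOFS =====

-- the symplectic entry ⟨line i, line j⟩ mod 3
def pvG (lr : List (Int × Int)) (i j : Nat) : Int :=
  PySem.Int.mod ((lr.getD i (0, 0)).1 * (lr.getD j (0, 0)).2 - (lr.getD j (0, 0)).1 * (lr.getD i (0, 0)).2) 3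

-- n×n matrix with entry f a b
def pvMat (n : Nat) (f : Nat → Nat → Int) : List (List Int) :=
  (List.range n).map (fun a => (List.range n).map (f a))

def pvAstep (lr : List (Int × Int)) (i : Nat) (M : List (List Int)) (j : Nat) : List (List Int) :=
  M.set i ((M.getD i []).set j (pvG lr i j))

theorem map_range_getD {α : Type} (n i : Nat) (f : Nat → α) (d : α) (hi : i < n) :
    ((List.range n).map f).getD i d = f i := by
  simp [List.getD, hi]

theorem map_range_set {α : Type} (n i : Nat) (f : Nat → α) (v : α) :
    ((List.range n).map f).set i v = (List.range n).map (fun a => if a = i then v else f a) := by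
  apply List.ext_getElem
  · simp
  · intro k h1 h2
    simp only [List.getElem_set, List.getElem_map, List.getElem_range]
    split <;> split <;> first | rfl | omega

theorem mat_congr (n : Nat) (f g : Nat → Nat → Int)
    (h : ∀ a, a < n → ∀ b, b < n → f a b = g a b) : pvMat n f = pvMat n g := by
  unfold pvMat
  apply List.map_congr_left
  intro a ha
  apply List.map_congr_left
  intro b hb
  exact h a (List.mem_range.mp ha) b (List.mem_range.mp hb)

theorem mat_getD (n i : Nat) (f : Nat → Nat → Int) (hi : i < n) :
    (pvMat n f).getD i [] = (List.range n).map (f i) :=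
  map_range_getD n i _ [] hi

theorem pvG_diag (lr : List (Int × Int)) (a : Nat) : pvG lr a a = 0 := by
  unfold pvG
  rw [sub_self, PySem.Int.mod_eq_emod_of_pos (by norm_num)]
  simp

theorem pvG_mirror (lr : List (Int × Int)) (i j : Nat) :
    PySem.Int.mod (-(pvG lr i j)) 3 = pvG lr j i := by
  unfold pvG
  rw [PySem.Int.mod_eq_emod_of_pos (by norm_num), PySem.Int.mod_eq_emod_of_pos (by norm_num),
      PySem.Int.mod_eq_emod_of_pos (by norm_num)]
  have h : (lr.getD j (0, 0)).1 * (lr.getD i (0, 0)).2 - (lr.getD i (0, 0)).1 * (lr.getD j (0, 0)).2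
      = -((lr.getD i (0, 0)).1 * (lr.getD j (0, 0)).2 - (lr.getD j (0, 0)).1 * (lr.getD i (0, 0)).2) := by ring
  rw [h]
  omega

theorem set_getD_self {α : Type} (M : List α) (i : Nat) (d : α) (_h : i < M.length) :
    M.set i (M.getD i d) = M := by
  apply List.ext_getElem
  · simp
  · intro k h1 h2
    simp only [List.getElem_set]
    split
    · rename_i hk; subst hk; simp [List.getD, List.getElem?_eq_getElem h2]
    · rfl

theorem getD_set_self {α : Type} (M : List α) (i : Nat) (r d : α) (h : i < M.length) :
    (M.set i r).getD i d = r := by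
  simp [List.getD, h]

-- hoisting: A's inner loop only rewrites row i
theorem hoistA (lr : List (Int × Int)) (i : Nat) (L : List Nat) :
    ∀ (M : List (List Int)), i < M.length →
      L.foldl (pvAstep lr i) M
        = M.set i (L.foldl (fun r j => r.set j (pvG lr i j)) (M.getD i [])) := by
  induction L with
  | nil => intro M h; simp only [List.foldl_nil]; exact (set_getD_self M i [] h).symm
  | cons j L ih =>
      intro M h
      simp only [List.foldl_cons]
      rw [ih (pvAstep lr i M j) (by simp [pvAstep]; omega)]
      unfold pvAstep
      rw [getD_set_self M i _ [] h, List.set_set]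

-- overwriting a row of pvMat-shape left to right
theorem rowfold (n : Nat) (f q : Nat → Int) :
    ∀ m, m ≤ n →
      (List.range m).foldl (fun r j => r.set j (f j)) ((List.range n).map q)
        = (List.range n).map (fun b => if b < m then f b else q b) := by
  intro m
  induction m with
  | zero => intro _; simp
  | succ m ih =>
      intro h
      rw [List.range_succ, List.foldl_append, ih (by omega)]
      simp only [List.foldl_cons, List.foldl_nil]
      rw [map_range_set]
      apply List.map_congr_left
      intro b _
      by_cases hbm : b = m
      · subst hbm; simp
      · by_cases hb : b < m <;> simp [hbm, hb] <;> omega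

theorem A_fold (lr : List (Int × Int)) :
    ∀ m, m ≤ lr.length →
      (List.range m).foldl
          (fun M i => (List.range lr.length).foldl (pvAstep lr i) M)
          (pvMat lr.length (fun _ _ => 0))
        = pvMat lr.length (fun a b => if a < m then pvG lr a b else 0) := by
  intro m
  induction m with
  | zero => intro _; exact mat_congr _ _ _ (by intro a _ b _; simp)
  | succ m ih =>
      intro h
      rw [List.range_succ, List.foldl_append, ih (by omega)]
      simp only [List.foldl_cons, List.foldl_nil]
      have hm : m < lr.length := by omega
      have hlen : m < (pvMat lr.length (fun a b => if a < m then pvG lr a b else 0)).length := by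
        simp [pvMat]; omega
      rw [hoistA lr m _ _ hlen]
      rw [mat_getD _ m _ hm, rowfold lr.length (pvG lr m) _ lr.length (le_refl _)]
      unfold pvMat
      rw [map_range_set]
      apply List.map_congr_left
      intro a ha
      by_cases ham : a = m
      · subst ham
        rw [if_pos rfl]
        apply List.map_congr_left
        intro b hb
        simp [List.mem_range.mp hb]
      · simp only [if_neg ham]
        apply List.map_congr_left
        intro b _
        by_cases h1 : a < m <;> simp [h1] <;> omega

theorem replicate_eq_pvMat (n : Nat) :
    List.replicate n (List.replicate n (0 : Int)) = pvMat n (fun _ _ => 0) := by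
  unfold pvMat
  rw [show ((List.range n).map fun _ => (List.range n).map (fun _ => (0:Int)))
        = (List.range n).map (fun _ => List.replicate n (0:Int)) from by
      apply List.map_congr_left; intro a _; simp [List.map_const']]
  simp [List.map_const']

theorem A_eq (lr : List (Int × Int)) :
    build_symp_lines_from_line_rep lr = pvMat lr.length (pvG lr) := by
  show (List.range lr.length).foldl
      (fun M i => (List.range lr.length).foldl (pvAstep lr i) M)
      (List.replicate lr.length (List.replicate lr.length (0 : Int)))
    = pvMat lr.length (pvG lr)
  rw [replicate_eq_pvMat, A_fold lr lr.length (le_refl _)]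
  apply mat_congr
  intro a ha b _
  simp [ha]

-- B's upper-triangle table
def pvUpper (lr : List (Int × Int)) : List (List Int) :=
  (List.range lr.length).map (fun i => (List.range' (i + 1) (lr.length - (i + 1))).map (pvG lr i))

theorem upper_getD (lr : List (Int × Int)) (j : Nat) (hj : j < lr.length) :
    (pvUpper lr).getD j [] = (List.range' (j + 1) (lr.length - (j + 1))).map (pvG lr j) := by
  unfold pvUpper
  exact map_range_getD _ j _ [] hj

theorem upper_entry (lr : List (Int × Int)) (j i : Nat) (hji : j < i) (hi : i < lr.length) :
    ((pvUpper lr).getD j []).getD (i - j - 1) 0 = pvG lr j i := by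
  rw [upper_getD lr j (by omega)]
  have hlt : i - j - 1 < lr.length - (j + 1) := by omega
  have hlen : i - j - 1 < ((List.range' (j + 1) (lr.length - (j + 1))).map (pvG lr j)).length := by
    simp [hlt]
  rw [List.getD_eq_getElem _ _ hlen]
  simp only [List.getElem_map, List.getElem_range']
  congr 1
  omega

theorem B_row (lr : List (Int × Int)) (i : Nat) (hi : i < lr.length) :
    ((List.range i).map (fun j => PySem.Int.mod (-((pvUpper lr).getD j []).getD (i - j - 1) 0) 3))
        ++ [0] ++ (pvUpper lr).getD i []
      = (List.range lr.length).map (pvG lr i) := by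
  rw [upper_getD lr i hi]
  apply List.ext_getElem
  · simp; omega
  · intro k h1 h2
    simp only [List.getElem_map, List.getElem_range]
    by_cases hk : k < i
    · rw [List.getElem_append_left (bs := (List.range' (i + 1) (lr.length - (i + 1))).map (pvG lr i)) (by simp; omega)]
      rw [List.getElem_append_left (by simp; omega)]
      simp only [List.getElem_map, List.getElem_range]
      rw [upper_entry lr k i hk hi, pvG_mirror]
    · by_cases hk2 : k = i
      · subst hk2
        rw [List.getElem_append_left (bs := (List.range' (k + 1) (lr.length - (k + 1))).map (pvG lr k)) (by simp)]
        rw [List.getElem_append_right (by simp)]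
        simp [pvG_diag]
      · have hki : i < k := by omega
        have hkn : k < lr.length := by simpa using h2
        rw [List.getElem_append_right (by simp; omega)]
        simp only [List.getElem_map, List.getElem_range']
        simp only [List.length_append, List.length_map, List.length_range, List.length_cons,
          List.length_nil]
        congr 1
        omega

theorem B_eq (lr : List (Int × Int)) :
    build_symp_lines_from_line_rep_alt lr = pvMat lr.length (pvG lr) := by
  show (List.range lr.length).map (fun i =>
      ((List.range i).map (fun j => PySem.Int.mod (-((pvUpper lr).getD j []).getD (i - j - 1) 0) 3))
        ++ [0] ++ (pvUpper lr).getD i [])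
    = pvMat lr.length (pvG lr)
  unfold pvMat
  apply List.map_congr_left
  intro i hi
  exact B_row lr i (List.mem_range.mp hi)

-- ===== VERDICT (by name: the statement is the Claim_ definition above) =====
theorem build_symp_lines_from_line_rep_spec : Claim_equal_build_symp_lines_from_line_rep := by
  intro lr _
  unfold Spec_build_symp_lines_from_line_rep
  rw [A_eq, B_eq]
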